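-- pv_equiv track=rewrite | github.com/atomi7e/advanced_python_new | Week_3/task_8.py | check_digits
-- ===== SOURCE A (Python) =====
-- def check_digits(num):
--     temp = num
--     while temp > 0:
--         digit = temp % 10
--
--         if digit == 0:
--             return False
--
--         if num % digit != 0:
--             return False
--
--         temp = temp // 10
--     return True
-- ===== SOURCE B (Python) =====
-- def check_digits(num):
--     if num <= 0:
--         return True
--     for d in str(num):
--         digit = int(d)
--         if digit == 0 or num % digit != 0:
--             return False
--     return True
-- ===== Notes on version B (the rewrite author's own statement) =====
-- stated objective: idiomatic
-- what changed: B iterates over the decimal string of num (most-significant digit first) instead of A's repeated %10 // 10 arithmetic loop, with an explicit early True for num <= 0 where A's while loop never runs.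
import Mathlib
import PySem

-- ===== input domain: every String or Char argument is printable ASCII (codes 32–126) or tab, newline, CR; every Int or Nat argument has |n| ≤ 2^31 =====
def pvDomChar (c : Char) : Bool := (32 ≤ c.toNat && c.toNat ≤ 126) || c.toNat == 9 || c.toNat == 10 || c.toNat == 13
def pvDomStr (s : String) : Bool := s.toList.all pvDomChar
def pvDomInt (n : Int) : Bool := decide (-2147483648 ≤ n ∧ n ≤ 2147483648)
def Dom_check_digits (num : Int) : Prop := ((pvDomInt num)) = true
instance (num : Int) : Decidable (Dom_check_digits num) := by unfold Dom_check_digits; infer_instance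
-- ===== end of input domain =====

-- B checks divisibility by iterating over the decimal string of num (most-significant digit
-- first) instead of A's %10 // 10 arithmetic loop; same cost, more idiomatic.


-- ===== PORT A =====
-- the while loop of A: temp counts down via floor division by 10
def check_digits_loop (num temp : Int) : Bool :=
  if _h : temp > 0 then
    let digit := PySem.Int.mod temp 10
    if digit == 0 then false
    else if PySem.Int.mod num digit != 0 then false
    else check_digits_loop num (PySem.Int.floordiv temp 10)
  else true
termination_by temp.toNat
decreasing_by
  have h10 : (0:Int) < 10 := by norm_num
  rw [PySem.Int.floordiv_eq_ediv_of_pos h10]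
  omega

def check_digits (num : Int) : Bool := check_digits_loop num num

-- ===== PORT B =====
-- for d in str(num): digit = int(d) — exact here since every character of str(num) for
-- num > 0 is a decimal digit, so int(d) is its code minus 48
def check_digits_alt (num : Int) : Bool :=
  if num ≤ 0 then true
  else
    (PySem.Int.toStr num).toList.all (fun c =>
      let digit : Int := (c.toNat : Int) - 48
      !(digit == 0 || PySem.Int.mod num digit != 0))

-- ===== PRECONDITION & SPEC =====
def Spec_check_digits (num : Int) (out : Bool) : Prop := out = check_digits_alt num
instance (num : Int) (out : Bool) : Decidable (Spec_check_digits num out) := by unfold Spec_check_digits; infer_instance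

-- ===== CLAIM (what is proved, stated in full; the proofs are below) =====
def Claim_equal_check_digits : Prop := ∀ (num : Int), Dom_check_digits num → Spec_check_digits num (check_digits num)

-- ===== LEMMAS AND PROOFS =====

-- common predicate on a (Nat) decimal digit: nonzero and divides num
def pvDigitOk (num : Int) (d : Nat) : Bool :=
  !((d : Int) == 0) && (PySem.Int.mod num (d : Int) == 0)

-- all respects pointwise-equal predicates on members
theorem pvAllCongrMem {α : Type} {l : List α} {p q : α → Bool}
    (h : ∀ x ∈ l, p x = q x) : l.all p = l.all q := by
  induction l with
  | nil => rfl
  | cons a l ih =>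
    simp only [List.all_cons, h a (List.mem_cons_self), ih (fun x hx => h x (List.mem_cons_of_mem a hx))]

-- one iteration of A's loop body as the conjunct pvDigitOk
theorem pvStep_eq (num D : Int) (rest : Bool) :
    (if D == 0 then false else if PySem.Int.mod num D != 0 then false else rest)
      = ((!(D == 0) && (PySem.Int.mod num D == 0)) && rest) := by
  by_cases h0 : D = 0
  · simp [h0]
  · by_cases hm : PySem.Int.mod num D = 0 <;> simp [h0, hm]

-- A's loop checks pvDigitOk on the base-10 digits of temp
theorem check_digits_loop_eq (num : Int) (t : Nat) :
    check_digits_loop num (t : Int) = (Nat.digits 10 t).all (pvDigitOk num) := by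
  induction t using Nat.strong_induction_on with
  | _ t ih =>
    rw [check_digits_loop]
    by_cases ht : (t : Int) > 0
    · have ht' : 0 < t := by exact_mod_cast ht
      rw [dif_pos ht]
      have hmod : PySem.Int.mod (t : Int) 10 = ((t % 10 : Nat) : Int) := by
        exact_mod_cast PySem.Int.mod_natCast t 10
      have hdiv : PySem.Int.floordiv (t : Int) 10 = ((t / 10 : Nat) : Int) := by
        exact_mod_cast PySem.Int.floordiv_natCast t 10
      rw [Nat.digits_def' (by norm_num : 1 < 10) ht', List.all_cons]
      simp only [hmod, hdiv]
      rw [ih (t / 10) (Nat.div_lt_self ht' (by norm_num))]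
      exact pvStep_eq num _ _
    · have ht0 : t = 0 := by omega
      rw [dif_neg ht]
      simp [ht0]

-- Nat.toDigitsCore unrolled against Nat.digits (enough fuel, positive n)
theorem toDigitsCore_eq (fuel : Nat) : ∀ (n : Nat) (acc : List Char), 0 < n → n ≤ fuel →
    Nat.toDigitsCore 10 fuel n acc
      = ((Nat.digits 10 n).reverse.map Nat.digitChar) ++ acc := by
  induction fuel with
  | zero => intro n acc h1 h2; omega
  | succ f ih =>
    intro n acc h1 h2
    rw [Nat.toDigitsCore]
    rw [Nat.digits_def' (by norm_num : 1 < 10) h1]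
    by_cases hz : n / 10 = 0
    · rw [if_pos hz, hz]
      simp
    · rw [if_neg hz]
      rw [ih (n / 10) (Nat.digitChar (n % 10) :: acc) (Nat.pos_of_ne_zero hz)
        (by have := Nat.div_lt_self h1 (by norm_num : 1 < 10); omega)]
      simp

theorem toDigits_eq (n : Nat) (h : 0 < n) :
    Nat.toDigits 10 n = (Nat.digits 10 n).reverse.map Nat.digitChar := by
  rw [Nat.toDigits]
  rw [toDigitsCore_eq (n + 1) n [] h (by omega)]
  simp

-- a decimal digit round-trips through its character
theorem digitChar_toNat (d : Nat) (hd : d < 10) :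
    ((Nat.digitChar d).toNat : Int) - 48 = (d : Int) := by
  interval_cases d <;> decide

-- B's check, rewritten to pvDigitOk over the digit list
theorem alt_eq (num : Int) (h : 0 < num) :
    check_digits_alt num = (Nat.digits 10 num.toNat).all (pvDigitOk num) := by
  unfold check_digits_alt
  rw [if_neg (by omega)]
  rw [PySem.Int.toList_toStr]
  unfold PySem.Int.toChars
  rw [if_neg (by omega)]
  rw [toDigits_eq num.toNat (by omega)]
  rw [List.all_map, List.all_reverse]
  apply pvAllCongrMem
  intro d hd
  have hlt : d < 10 := Nat.digits_lt_base (by norm_num) hd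
  simp only [Function.comp_apply, digitChar_toNat d hlt]
  unfold pvDigitOk
  by_cases h0 : (d : Int) = 0
  · simp [h0]
  · by_cases hm : PySem.Int.mod num (d : Int) = 0 <;> simp [hm, bne]

-- ===== VERDICT (by name: the statement is the Claim_ definition above) =====
theorem check_digits_spec : Claim_equal_check_digits := by
  intro num _
  unfold Spec_check_digits check_digits
  by_cases h : 0 < num
  · have : num = ((num.toNat : Nat) : Int) := by omega
    rw [alt_eq num h, ← check_digits_loop_eq num num.toNat, ← this]
  · rw [check_digits_loop]
    rw [dif_neg (by omega)]
    unfold check_digits_alt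
    rw [if_pos (by omega)]
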